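-- pv_equiv track=rewrite | github.com/Aaron-Lilly/symphainy-production | tests_old_archive/fixtures/smart_city_usage_validator.py | _is_in_type_checking_block
-- ===== SOURCE A (Python) =====
-- from typing import List, Dict, Any, Optional
--
-- def _is_in_type_checking_block(lines: List[str], line_index: int) -> bool:
--     """Check if line is inside a TYPE_CHECKING block."""
--     in_block = False
--     for i in range(line_index + 1):
--         line = lines[i].strip()
--         if 'if TYPE_CHECKING:' in line or 'if typing.TYPE_CHECKING:' in line:
--             in_block = True
--         elif in_block and (line.startswith('import ') or line.startswith('from ')):
--             continue
--         elif in_block and line and not line.startswith('#'):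
--             # Check if we've left the TYPE_CHECKING block
--             if not (line.startswith('import ') or line.startswith('from ') or line.startswith('    ') or line == ''):
--                 in_block = False
--     return in_block
-- ===== SOURCE B (Python) =====
-- def _is_in_type_checking_block(lines, line_index):
--     """Check if line is inside a TYPE_CHECKING block.
--
--     Backward scan: walk up from line_index; the nearest earlier line that is
--     either the block opener or a block-ending statement decides the answer.
--     """
--     for i in range(line_index, -1, -1):
--         line = lines[i].strip()
--         if 'if TYPE_CHECKING:' in line or 'if typing.TYPE_CHECKING:' in line:
--             return True
--         if line and not line.startswith('#') and not line.startswith('import ') and not line.startswith('from '):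
--             return False
--     return False
-- ===== Notes on version B (the rewrite author's own statement) =====
-- stated objective: alternative
-- what changed: Replaces A's forward full scan with stateful flag by a backward early-exit scan from line_index that returns at the nearest opener or block-ending statement.
import Mathlib
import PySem

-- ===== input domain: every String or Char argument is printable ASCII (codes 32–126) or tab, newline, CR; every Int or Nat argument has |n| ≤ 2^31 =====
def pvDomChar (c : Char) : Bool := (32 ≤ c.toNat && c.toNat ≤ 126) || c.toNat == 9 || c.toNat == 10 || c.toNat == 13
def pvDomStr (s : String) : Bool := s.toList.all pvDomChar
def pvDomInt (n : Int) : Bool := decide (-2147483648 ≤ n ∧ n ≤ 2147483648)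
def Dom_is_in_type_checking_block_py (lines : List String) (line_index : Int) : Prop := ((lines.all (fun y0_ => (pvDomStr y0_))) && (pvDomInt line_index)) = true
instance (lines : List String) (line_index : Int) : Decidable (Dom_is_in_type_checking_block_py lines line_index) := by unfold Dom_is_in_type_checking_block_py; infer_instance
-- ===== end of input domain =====

-- B replaces A's forward scan with a stateful flag by a backward early-exit scan from line_index
-- that returns at the nearest opener or block-ending statement (alternative decomposition, same cost class).

-- ===== PORT A =====
-- the loop body of A: one step of the forward scan, state = in_block (strings handled on the List Char side)
def pvStepA (lines : List String) (in_block : Bool) (i : Int) : Bool :=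
  let line := PySem.Chars.strip (PySem.List.pyGetD lines i "").toList
  if PySem.Chars.isIn "if TYPE_CHECKING:".toList line
      || PySem.Chars.isIn "if typing.TYPE_CHECKING:".toList line then
    true
  else if in_block && (PySem.Chars.startswith line "import ".toList
      || PySem.Chars.startswith line "from ".toList) then
    in_block  -- continue
  else if in_block && !line.isEmpty && !PySem.Chars.startswith line "#".toList then
    if !(PySem.Chars.startswith line "import ".toList || PySem.Chars.startswith line "from ".toList
        || PySem.Chars.startswith line "    ".toList || line.isEmpty) then
      false
    else in_block
  else in_block

def is_in_type_checking_block_py (lines : List String) (line_index : Int) : Bool :=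
  (PySem.List.pyRange 0 (line_index + 1) 1).foldl (pvStepA lines) false

-- ===== PORT B =====
-- backward scan: pvAltGo lines n inspects indices n-1, n-2, …, 0 (Python's range(line_index, -1, -1))
def pvAltGo (lines : List String) : Nat → Bool
  | 0 => false
  | n + 1 =>
    let line := PySem.Chars.strip (PySem.List.pyGetD lines (n : Int) "").toList
    if PySem.Chars.isIn "if TYPE_CHECKING:".toList line
        || PySem.Chars.isIn "if typing.TYPE_CHECKING:".toList line then
      true
    else if !line.isEmpty && !PySem.Chars.startswith line "#".toList
        && !PySem.Chars.startswith line "import ".toList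
        && !PySem.Chars.startswith line "from ".toList then
      false
    else pvAltGo lines n

def is_in_type_checking_block_py_alt (lines : List String) (line_index : Int) : Bool :=
  pvAltGo lines (line_index + 1).toNat

-- ===== PRECONDITION & SPEC =====
-- Pre_ excludes exactly the inputs where Python A raises IndexError: line_index ≥ len(lines).
def Pre_is_in_type_checking_block_py (lines : List String) (line_index : Int) : Prop :=
  line_index < (lines.length : Int)
instance (lines : List String) (line_index : Int) : Decidable (Pre_is_in_type_checking_block_py lines line_index) := by unfold Pre_is_in_type_checking_block_py; infer_instance

def pvWitness_is_in_type_checking_block_py : List String × Int :=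
  (["if TYPE_CHECKING:", "    import os"], 1)

def Spec_is_in_type_checking_block_py (lines : List String) (line_index : Int) (out : Bool) : Prop := out = is_in_type_checking_block_py_alt lines line_index
instance (lines : List String) (line_index : Int) (out : Bool) : Decidable (Spec_is_in_type_checking_block_py lines line_index out) := by unfold Spec_is_in_type_checking_block_py; infer_instance

-- ===== CLAIM (what is proved, stated in full; the proofs are below) =====
def Claim_equal_is_in_type_checking_block_py : Prop := ∀ (lines : List String) (line_index : Int), Dom_is_in_type_checking_block_py lines line_index → Pre_is_in_type_checking_block_py lines line_index → Spec_is_in_type_checking_block_py lines line_index (is_in_type_checking_block_py lines line_index)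

-- ===== LEMMAS AND PROOFS =====

-- a stripped line never starts with a space (so A's '    ' test inside branch 3 is always false)
theorem strip_not_startswith_spaces (s : List Char) :
    PySem.Chars.startswith (PySem.Chars.strip s) "    ".toList = false := by
  by_contra h
  rw [Bool.not_eq_false, PySem.Chars.startswith] at h
  have hpre : (' ' :: "   ".toList) <+: PySem.Chars.strip s :=
    List.isPrefixOf_iff_prefix.mp h
  -- strip s is (dropWhile isspace s.reverse-trimmed); its head is not whitespace
  have hpre2 : PySem.Chars.strip s <+: PySem.Chars.lstrip s := by
    simp only [PySem.Chars.strip, PySem.Chars.rstrip]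
    have := List.dropWhile_suffix (l := (PySem.Chars.lstrip s).reverse) (p := PySem.Chars.isspace)
    have := List.reverse_prefix.mpr this
    simpa using this
  have hpre3 : (' ' :: "   ".toList) <+: PySem.Chars.lstrip s := hpre.trans hpre2
  obtain ⟨t, ht⟩ := hpre3
  simp only [PySem.Chars.lstrip] at ht
  have hne : List.dropWhile PySem.Chars.isspace s ≠ [] := by rw [← ht]; simp
  have hhead := List.head_dropWhile_not PySem.Chars.isspace hne
  have hsp : (List.dropWhile PySem.Chars.isspace s).head hne = ' ' := by
    simp only [← ht]; rfl
  rw [hsp] at hhead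
  exact absurd hhead (by decide)

-- one step of A's forward scan, expressed in B's branch shape
theorem stepA_eq (lines : List String) (b : Bool) (i : Int) :
    pvStepA lines b i =
      (let line := PySem.Chars.strip (PySem.List.pyGetD lines i "").toList
       if PySem.Chars.isIn "if TYPE_CHECKING:".toList line
           || PySem.Chars.isIn "if typing.TYPE_CHECKING:".toList line then true
       else if !line.isEmpty && !PySem.Chars.startswith line "#".toList
           && !PySem.Chars.startswith line "import ".toList
           && !PySem.Chars.startswith line "from ".toList then false
       else b) := by
  simp only [pvStepA, strip_not_startswith_spaces]
  generalize PySem.Chars.strip (PySem.List.pyGetD lines i "").toList = l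
  generalize PySem.Chars.isIn "if TYPE_CHECKING:".toList l = o1
  generalize PySem.Chars.isIn "if typing.TYPE_CHECKING:".toList l = o2
  generalize l.isEmpty = e
  generalize PySem.Chars.startswith l "#".toList = hh
  generalize PySem.Chars.startswith l "import ".toList = im
  generalize PySem.Chars.startswith l "from ".toList = fr
  cases b <;> cases o1 <;> cases o2 <;> cases e <;> cases hh <;> cases im <;> cases fr <;> simp

-- the forward fold over range(n) equals the backward scan from index n-1
theorem foldA_eq_altGo (lines : List String) (n : Nat) :
    (PySem.List.pyRange 0 (n : Int) 1).foldl (pvStepA lines) false = pvAltGo lines n := by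
  induction n with
  | zero => simp [pvAltGo]
  | succ n ih =>
    have hsplit : PySem.List.pyRange 0 ((n : Int) + 1) 1
        = PySem.List.pyRange 0 (n : Int) 1 ++ [(n : Int)] :=
      PySem.List.pyRange_one_succ_right (by positivity)
    push_cast
    rw [hsplit, List.foldl_append, ih]
    simp only [List.foldl_cons, List.foldl_nil]
    rw [stepA_eq]
    rfl

-- ===== VERDICT (by name: the statement is the Claim_ definition above) =====
theorem is_in_type_checking_block_py_spec : Claim_equal_is_in_type_checking_block_py := by
  intro lines line_index _ _
  unfold Spec_is_in_type_checking_block_py is_in_type_checking_block_py is_in_type_checking_block_py_alt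
  by_cases h : 0 ≤ line_index + 1
  · have : line_index + 1 = ((line_index + 1).toNat : Int) := (Int.toNat_of_nonneg h).symm
    rw [this, foldA_eq_altGo]
    congr 1
  · have h1 : line_index + 1 ≤ 0 := by omega
    have h2 : (line_index + 1).toNat = 0 := by omega
    rw [PySem.List.pyRange_one_eq_nil h1, h2]
    simp [pvAltGo]
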